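-- pv_equiv track=rewrite | github.com/oshamash/umake | umake.py | find_between
-- ===== SOURCE A (Python) =====
-- def find_between(string, token_start, token_end):
--     state = "find_token_start"
--     start_idx = None
--     for idx, ch in enumerate(string):
--         if state == "find_token_start":
--             if ch == token_start:
--                 state = "find_token_end"
--                 start_idx = idx
--         elif state == "find_token_end":
--             if ch == token_end or idx == len(string) - 1:
--                 token = string[start_idx:idx+1].strip()
--                 if not token == "":
--                     yield token
--                 state = "find_token_start"
-- ===== SOURCE B (Python) =====
-- def find_between(string, token_start, token_end):
--     # Nested index-jumping scans: the outer loop looks for a start character,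
--     # the inner loop advances to the matching end character (or the last index),
--     # and the cursor jumps past each emitted slice.
--     n = len(string)
--     tokens = []
--     i = 0
--     while i < n:
--         if string[i] != token_start:
--             i += 1
--             continue
--         if i == n - 1:
--             break
--         j = i + 1
--         while string[j] != token_end and j != n - 1:
--             j += 1
--         token = string[i:j + 1].strip()
--         if token:
--             tokens.append(token)
--         i = j + 1
--     return tokens
-- ===== Notes on version B (the rewrite author's own statement) =====
-- stated objective: alternative
-- what changed: Replaces A's two-state state machine over a single enumerate pass by nested index-jumping while loops: an outer scan locates each start character, an inner scan advances the cursor to the matching end character or the last index, and the cursor jumps past every emitted slice.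
import Mathlib
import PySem

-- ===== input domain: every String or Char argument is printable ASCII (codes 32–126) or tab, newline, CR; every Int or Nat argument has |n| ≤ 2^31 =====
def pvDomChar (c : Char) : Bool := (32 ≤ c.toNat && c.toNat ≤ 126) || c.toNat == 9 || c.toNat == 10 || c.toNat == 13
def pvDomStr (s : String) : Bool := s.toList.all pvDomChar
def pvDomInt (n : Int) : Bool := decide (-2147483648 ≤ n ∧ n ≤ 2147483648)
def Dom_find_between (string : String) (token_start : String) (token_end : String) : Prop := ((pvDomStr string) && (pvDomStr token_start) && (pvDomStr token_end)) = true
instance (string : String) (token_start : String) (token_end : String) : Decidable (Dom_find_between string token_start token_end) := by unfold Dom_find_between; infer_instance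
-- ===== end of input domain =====

-- B replaces A's two-state state machine over one enumerate pass by nested index-jumping
-- while loops (objective: alternative decomposition, same cost); Python A is a generator,
-- compared as the list of yielded tokens.

-- ===== PORT A =====
-- state machine over enumerate(string); state=false ↔ "find_token_start", start = start_idx
def goA (string token_start token_end : String) :
    List Char → Nat → Bool → Nat → List String → List String
  | [], _, _, _, acc => acc
  | ch :: rest, idx, false, start, acc =>
      if String.ofList [ch] = token_start then
        goA string token_start token_end rest (idx+1) true idx acc
      else
        goA string token_start token_end rest (idx+1) false start acc
  | ch :: rest, idx, true, start, acc =>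
      if String.ofList [ch] = token_end ∨ (idx : Int) = PySem.Str.len string - 1 then
        let token := PySem.Str.strip (PySem.Str.slice string (some (start : Int)) (some ((idx : Int)+1)))
        goA string token_start token_end rest (idx+1) false start
          (if token = "" then acc else acc ++ [token])
      else
        goA string token_start token_end rest (idx+1) true start acc

def find_between (string : String) (token_start : String) (token_end : String) : List String :=
  goA string token_start token_end string.toList 0 false 0 []

-- ===== PORT B =====
-- B's inner while loop: advance j until string[j] == token_end or j == n - 1
def goInner (l : List Char) (token_end : String) (j : Nat) : Nat :=
  if h : j < l.length then
    if String.ofList [l[j]] = token_end ∨ j = l.length - 1 then j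
    else goInner l token_end (j+1)
  else j
termination_by l.length - j

-- the inner cursor never moves left (B's port needs this for termination)
theorem goInner_ge (l : List Char) (te : String) : ∀ N j, l.length - j ≤ N → j ≤ goInner l te j := by
  intro N
  induction N with
  | zero => intro j hj; rw [goInner, dif_neg (by omega)]
  | succ N ih =>
    intro j hj
    rw [goInner]
    split
    · split
      · exact le_refl j
      · exact le_trans (by omega) (ih (j+1) (by omega))
    · exact le_refl j

-- B's outer while loop over the cursor i
def goOuter (l : List Char) (string token_start token_end : String) (i : Nat) (acc : List String) :
    List String :=
  if h : i < l.length then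
    if String.ofList [l[i]] = token_start then
      if i = l.length - 1 then acc
      else
        let j := goInner l token_end (i+1)
        let token := PySem.Str.strip (PySem.Str.slice string (some (i : Int)) (some ((j : Int)+1)))
        goOuter l string token_start token_end (j+1)
          (if token = "" then acc else acc ++ [token])
    else goOuter l string token_start token_end (i+1) acc
  else acc
termination_by l.length - i
decreasing_by
  · have := goInner_ge l token_end (l.length - (i+1)) (i+1) (le_refl _)
    omega
  · omega

def find_between_alt (string : String) (token_start : String) (token_end : String) : List String :=
  goOuter string.toList string token_start token_end 0 []

-- ===== PRECONDITION & SPEC =====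
def Spec_find_between (string : String) (token_start : String) (token_end : String) (out : List String) : Prop := out = find_between_alt string token_start token_end
instance (string : String) (token_start : String) (token_end : String) (out : List String) : Decidable (Spec_find_between string token_start token_end out) := by unfold Spec_find_between; infer_instance

-- ===== CLAIM (what is proved, stated in full; the proofs are below) =====
def Claim_equal_find_between : Prop := ∀ (string : String) (token_start : String) (token_end : String), Dom_find_between string token_start token_end → Spec_find_between string token_start token_end (find_between string token_start token_end)

-- ===== LEMMAS AND PROOFS =====

-- the inner cursor stays inside the string
theorem goInner_le (l : List Char) (te : String) : ∀ N j, l.length - j ≤ N → j < l.length →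
    goInner l te j ≤ l.length - 1 := by
  intro N
  induction N with
  | zero => intro j hj hlt; omega
  | succ N ih =>
    intro j hj hlt
    rw [goInner, dif_pos hlt]
    split
    · next h =>
      omega
    · next h =>
      push Not at h
      exact ih (j+1) (by omega) (by omega)

-- A's end-state scan from index j equals: jump to e = goInner, emit the slice, restart
theorem endEq (string ts te : String) (st : Nat) :
    ∀ N j acc, string.toList.length - j ≤ N → j < string.toList.length →
      goA string ts te (string.toList.drop j) j true st acc =
        goA string ts te (string.toList.drop (goInner string.toList te j + 1))
          (goInner string.toList te j + 1) false st
          (if PySem.Str.strip (PySem.Str.slice string (some (st : Int))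
                (some ((goInner string.toList te j : Int)+1))) = ""
           then acc
           else acc ++ [PySem.Str.strip (PySem.Str.slice string (some (st : Int))
                (some ((goInner string.toList te j : Int)+1)))]) := by
  intro N
  induction N with
  | zero => intro j acc hj hlt; omega
  | succ N ih =>
    intro j acc hj hlt
    set l := string.toList with hl
    rw [List.drop_eq_getElem_cons hlt, goA]
    by_cases hstop : String.ofList [l[j]] = te ∨ (j : Int) = PySem.Str.len string - 1
    · have hg : goInner l te j = j := by
        rw [goInner, dif_pos hlt, if_pos]
        rcases hstop with h | h
        · exact Or.inl h
        · right
          rw [PySem.Str.len_eq, ← hl] at h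
          omega
      rw [if_pos hstop, hg]
    · have hne : j ≠ l.length - 1 := by
        intro h
        apply hstop
        right
        rw [PySem.Str.len_eq, ← hl]
        omega
      have hg : goInner l te j = goInner l te (j+1) := by
        rw [goInner, dif_pos hlt, if_neg]
        push Not
        refine ⟨?_, hne⟩
        intro h
        exact hstop (Or.inl h)
      rw [if_neg hstop, hg]
      exact ih (j+1) acc (by omega) (by omega)

-- MAIN: A's search-state scan from cursor i equals B's outer loop from cursor i
theorem mainEq (string ts te : String) :
    ∀ N i st acc, string.toList.length - i ≤ N → i ≤ string.toList.length →
      goA string ts te (string.toList.drop i) i false st acc =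
        goOuter string.toList string ts te i acc := by
  intro N
  induction N with
  | zero =>
    intro i st acc hN hi
    have : i = string.toList.length := by omega
    subst this
    rw [List.drop_length, goOuter, dif_neg (by omega)]
    rfl
  | succ N ih =>
    intro i st acc hN hi
    set l := string.toList with hl
    have hll : l.length = string.toList.length := by rw [hl]
    rcases Nat.eq_or_lt_of_le hi with heq | hlt
    · subst heq
      rw [List.drop_length, goOuter, dif_neg (by omega)]
      rfl
    · rw [List.drop_eq_getElem_cons hlt, goA, goOuter, dif_pos hlt]
      by_cases hs : String.ofList [l[i]] = ts
      · rw [if_pos hs, if_pos hs]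
        by_cases hend : i = l.length - 1
        · rw [if_pos hend]
          have : i + 1 = l.length := by omega
          rw [this, hl, List.drop_length]
          rfl
        · rw [if_neg hend]
          have hi1 : i + 1 < l.length := by omega
          have hge := goInner_ge l te (l.length - (i+1)) (i+1) (le_refl _)
          have hle := goInner_le l te (l.length - (i+1)) (i+1) (le_refl _) hi1
          rw [endEq string ts te i N (i+1) acc (by omega) hi1]
          exact ih (goInner l te (i+1) + 1) i _ (by omega) (by omega)
      · rw [if_neg hs, if_neg hs]
        exact ih (i+1) st acc (by omega) (by omega)

-- ===== VERDICT (by name: the statement is the Claim_ definition above) =====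
theorem find_between_spec : Claim_equal_find_between := by
  intro string ts te _
  unfold Spec_find_between find_between find_between_alt
  have := mainEq string ts te string.toList.length 0 0 [] (by omega) (by omega)
  simpa using this
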